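-- pv_equiv track=rewrite | github.com/wilmurillo-ai/Design-Assistant | .skills/openclaw-skills/skills/super9du/file-diff/scripts/diff_to_markdown.py | parse_diff_to_markdown
-- ===== SOURCE A (Python) =====
-- def parse_diff_to_markdown(source, target, diff_output, returncode):
--     """Convert diff output to markdown format."""
--
--     lines = diff_output.split("\n")
--
--     output = []
--     output.append(f"**File A**: `{source}`")
--     output.append(f"**File B**: `{target}`")
--     output.append("")
--     output.append("## Differences")
--     output.append("")
--
--     if returncode == 0:
--         output.append("_No differences found._")
--         return "\n".join(output)
--
--     # Skip the first two lines (--- and +++)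
--     content_lines = lines[3:] if len(lines) > 3 else []
--
--     current_hunk = []
--     changes = []
--
--     for line in content_lines:
--         if line.startswith("@@"):
--             if current_hunk:
--                 changes.append("\n".join(current_hunk))
--             current_hunk = [line]
--         else:
--             current_hunk.append(line)
--
--     if current_hunk:
--         changes.append("\n".join(current_hunk))
--
--     if changes:
--         output.append("```diff")
--         for change in changes:
--             output.append(change)
--         output.append("```")
--     else:
--         output.append("_No differences found._")
--
--     return "\n".join(output)
-- ===== SOURCE B (Python) =====
-- def parse_diff_to_markdown(source, target, diff_output, returncode):
--     """Convert diff output to markdown format."""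
--     header = [
--         f"**File A**: `{source}`",
--         f"**File B**: `{target}`",
--         "",
--         "## Differences",
--         "",
--     ]
--     if returncode == 0:
--         return "\n".join(header + ["_No differences found._"])
--     lines = diff_output.split("\n")
--     content_lines = lines[3:] if len(lines) > 3 else []
--     if not content_lines:
--         return "\n".join(header + ["_No differences found._"])
--     return "\n".join(header + ["```diff", "\n".join(content_lines), "```"])
-- ===== Notes on version B (the rewrite author's own statement) =====
-- stated objective: simpler
-- what changed: B drops A's @@-hunk-grouping state machine entirely (grouping lines into hunks and re-joining them is a no-op for the output) and directly joins the content lines into one ```diff block.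
import Mathlib
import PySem

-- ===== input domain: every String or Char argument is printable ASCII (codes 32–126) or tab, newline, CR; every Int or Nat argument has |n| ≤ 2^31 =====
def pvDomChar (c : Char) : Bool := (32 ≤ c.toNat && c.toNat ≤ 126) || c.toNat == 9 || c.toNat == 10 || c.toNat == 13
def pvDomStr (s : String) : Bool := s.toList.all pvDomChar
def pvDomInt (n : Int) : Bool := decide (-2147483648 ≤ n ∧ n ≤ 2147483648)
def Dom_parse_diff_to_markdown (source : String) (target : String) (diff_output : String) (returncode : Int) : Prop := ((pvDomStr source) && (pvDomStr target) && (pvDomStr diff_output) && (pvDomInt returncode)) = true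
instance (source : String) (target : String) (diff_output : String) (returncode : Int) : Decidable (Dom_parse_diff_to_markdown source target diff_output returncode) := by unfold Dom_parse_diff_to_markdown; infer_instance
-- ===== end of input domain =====

-- B replaces A's @@-hunk accumulation state machine (which only re-joins what it split) by
-- joining the content lines directly into one ```diff block; objective: simpler.


-- ===== PORT A =====
-- state = (current_hunk, changes); one iteration of A's for-loop
def pdStep (st : List String × List String) (line : String) : List String × List String :=
  if PySem.Str.startswith line "@@" then
    if st.1.isEmpty then ([line], st.2)
    else ([line], st.2 ++ [PySem.Str.join "\n" st.1])
  else (st.1 ++ [line], st.2)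

def parse_diff_to_markdown (source : String) (target : String) (diff_output : String) (returncode : Int) : String :=
  let lines := (PySem.Str.split? diff_output "\n").getD []   -- sep "\n" ≠ "", so split? is always some
  let output : List String :=
    ["**File A**: `" ++ source ++ "`", "**File B**: `" ++ target ++ "`", "", "## Differences", ""]
  if returncode == 0 then
    PySem.Str.join "\n" (output ++ ["_No differences found._"])
  else
    let content_lines := if lines.length > 3 then PySem.List.slice lines (some (3 : Int)) none else []
    let st := content_lines.foldl pdStep ([], [])
    let changes := if st.1.isEmpty then st.2 else st.2 ++ [PySem.Str.join "\n" st.1]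
    if changes.isEmpty then
      PySem.Str.join "\n" (output ++ ["_No differences found._"])
    else
      PySem.Str.join "\n" (output ++ (["```diff"] ++ changes ++ ["```"]))

-- ===== PORT B =====
def parse_diff_to_markdown_alt (source : String) (target : String) (diff_output : String) (returncode : Int) : String :=
  let header : List String :=
    ["**File A**: `" ++ source ++ "`", "**File B**: `" ++ target ++ "`", "", "## Differences", ""]
  if returncode == 0 then
    PySem.Str.join "\n" (header ++ ["_No differences found._"])
  else
    let lines := (PySem.Str.split? diff_output "\n").getD []
    let content_lines := if lines.length > 3 then PySem.List.slice lines (some (3 : Int)) none else []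
    if content_lines.isEmpty then
      PySem.Str.join "\n" (header ++ ["_No differences found._"])
    else
      PySem.Str.join "\n" (header ++ ["```diff", PySem.Str.join "\n" content_lines, "```"])

-- ===== PRECONDITION & SPEC =====
def Spec_parse_diff_to_markdown (source : String) (target : String) (diff_output : String) (returncode : Int) (out : String) : Prop := out = parse_diff_to_markdown_alt source target diff_output returncode
instance (source : String) (target : String) (diff_output : String) (returncode : Int) (out : String) : Decidable (Spec_parse_diff_to_markdown source target diff_output returncode out) := by unfold Spec_parse_diff_to_markdown; infer_instance

-- ===== CLAIM (what is proved, stated in full; the proofs are below) =====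
def Claim_equal_parse_diff_to_markdown : Prop := ∀ (source : String) (target : String) (diff_output : String) (returncode : Int), Dom_parse_diff_to_markdown source target diff_output returncode → Spec_parse_diff_to_markdown source target diff_output returncode (parse_diff_to_markdown source target diff_output returncode)

-- ===== LEMMAS AND PROOFS =====

theorem sjoin_singleton (a : String) : PySem.Str.join "\n" [a] = a := by
  simp [PySem.Str.join, PySem.Chars.join_singleton]

theorem ofList_newline_cons (x : List Char) :
    String.ofList ('\n' :: x) = "\n" ++ String.ofList x := by
  rw [show ('\n' :: x) = ['\n'] ++ x from rfl, String.ofList_append]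

theorem sjoin_cons_cons (a b : String) (rest : List String) :
    PySem.Str.join "\n" (a :: b :: rest) = a ++ "\n" ++ PySem.Str.join "\n" (b :: rest) := by
  simp [PySem.Str.join, PySem.Chars.join_cons_cons, String.ofList_append,
        ofList_newline_cons, String.append_assoc]

theorem sjoin_append (xs ys : List String) (hx : xs ≠ []) (hy : ys ≠ []) :
    PySem.Str.join "\n" (xs ++ ys)
      = PySem.Str.join "\n" xs ++ "\n" ++ PySem.Str.join "\n" ys := by
  induction xs with
  | nil => exact absurd rfl hx
  | cons a xs ih =>
    cases xs with
    | nil =>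
      cases ys with
      | nil => exact absurd rfl hy
      | cons b r => simpa [sjoin_singleton] using sjoin_cons_cons a b r
    | cons a2 xs2 =>
      have := ih (by simp)
      simp only [List.cons_append] at *
      rw [sjoin_cons_cons a, this, sjoin_cons_cons a a2 xs2]
      simp [String.append_assoc]

theorem sjoin_pair_collapse (cs : List String) (a b : String) :
    PySem.Str.join "\n" (cs ++ [a, b]) = PySem.Str.join "\n" (cs ++ [a ++ "\n" ++ b]) := by
  cases cs with
  | nil => simp [sjoin_cons_cons, sjoin_singleton]
  | cons c cs' =>
    rw [sjoin_append (c :: cs') [a, b] (by simp) (by simp),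
        sjoin_append (c :: cs') [a ++ "\n" ++ b] (by simp) (by simp)]
    simp [sjoin_cons_cons, sjoin_singleton]

theorem pdStep_fst_ne (st : List String × List String) (l : String) : (pdStep st l).1 ≠ [] := by
  unfold pdStep; split_ifs <;> simp

theorem foldl_pdStep_fst_ne (rest : List String) (st : List String × List String)
    (hh : st.1 ≠ []) : (rest.foldl pdStep st).1 ≠ [] := by
  induction rest generalizing st with
  | nil => exact hh
  | cons l r ih => exact ih _ (pdStep_fst_ne st l)

theorem foldl_pdStep_join (rest hunk changes : List String) (hh : hunk ≠ []) :
    PySem.Str.join "\n" ((rest.foldl pdStep (hunk, changes)).2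
        ++ [PySem.Str.join "\n" (rest.foldl pdStep (hunk, changes)).1])
      = PySem.Str.join "\n" (changes ++ [PySem.Str.join "\n" (hunk ++ rest)]) := by
  induction rest generalizing hunk changes with
  | nil => simp
  | cons l r ih =>
    simp only [List.foldl_cons]
    by_cases hs : PySem.Chars.startswith l.toList ['@', '@'] = true
    · have hne : hunk.isEmpty = false := by simpa [List.isEmpty_iff] using hh
      have hstep : pdStep (hunk, changes) l
          = ([l], changes ++ [PySem.Str.join "\n" hunk]) := by
        unfold pdStep; simp [hs, hh]
      rw [hstep, ih [l] _ (by simp)]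
      have h1 : (changes ++ [PySem.Str.join "\n" hunk]) ++ [PySem.Str.join "\n" (l :: r)]
          = changes ++ [PySem.Str.join "\n" hunk, PySem.Str.join "\n" (l :: r)] := by
        simp
      rw [show ([l] ++ r) = l :: r from rfl, h1, sjoin_pair_collapse,
          ← sjoin_append hunk (l :: r) hh (by simp)]
    · have hstep : pdStep (hunk, changes) l = (hunk ++ [l], changes) := by
        unfold pdStep; simp [hs]
      rw [hstep, ih (hunk ++ [l]) changes (by simp)]
      simp

theorem pdStep_nil (m : String) : pdStep ([], []) m = ([m], []) := by
  unfold pdStep; split_ifs <;> simp_all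

theorem sjoin_block (pre C suf : List String) (hp : pre ≠ []) (hC : C ≠ []) (hs : suf ≠ []) :
    PySem.Str.join "\n" (pre ++ C ++ suf)
      = PySem.Str.join "\n" pre ++ "\n" ++ PySem.Str.join "\n" C ++ "\n" ++ PySem.Str.join "\n" suf := by
  rw [sjoin_append (pre ++ C) suf (by simp [hp]) hs, sjoin_append pre C hp hC]

-- ===== VERDICT (by name: the statement is the Claim_ definition above) =====
theorem parse_diff_to_markdown_spec : Claim_equal_parse_diff_to_markdown := by
  intro source target diff_output returncode _
  unfold Spec_parse_diff_to_markdown parse_diff_to_markdown parse_diff_to_markdown_alt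
  by_cases hrc : returncode == 0
  · simp [hrc]
  · simp only [hrc, if_false, Bool.false_eq_true]
    set lines := (PySem.Str.split? diff_output "\n").getD [] with hl
    set cl := (if lines.length > 3 then PySem.List.slice lines (some (3 : Int)) none else []) with hcl
    cases hc : cl with
    | nil => simp
    | cons m ms =>
      simp only [List.foldl_cons, pdStep_nil, List.isEmpty_cons, Bool.false_eq_true, if_false]
      have hne := foldl_pdStep_fst_ne ms ([m], []) (by simp)
      have hne' : (ms.foldl pdStep ([m], [])).1.isEmpty = false := by
        simpa [List.isEmpty_iff] using hne
      simp only [hne', Bool.false_eq_true, if_false]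
      have hjoin := foldl_pdStep_join ms [m] [] (by simp)
      simp only [List.nil_append, List.singleton_append, sjoin_singleton] at hjoin
      have hCne : (ms.foldl pdStep ([m], [])).2 ++ [PySem.Str.join "\n" (ms.foldl pdStep ([m], [])).1] ≠ [] := by simp
      rw [if_neg (by simp :
        ¬ (((ms.foldl pdStep ([m], [])).2 ++ [PySem.Str.join "\n" (ms.foldl pdStep ([m], [])).1]).isEmpty = true))]
      rw [show ∀ (hdr : List String) (mid : List String),
            hdr ++ (["```diff"] ++ mid ++ ["```"]) = (hdr ++ ["```diff"]) ++ mid ++ ["```"]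
          from by intro hdr mid; simp,
          show ∀ (hdr : List String) (x : String),
            hdr ++ ["```diff", x, "```"] = (hdr ++ ["```diff"]) ++ [x] ++ ["```"]
          from by intro hdr x; simp]
      rw [sjoin_block _ _ _ (by simp) hCne (by simp),
          sjoin_block _ _ _ (by simp) (by simp) (by simp)]
      rw [hjoin]
      simp [sjoin_singleton]
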